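-- pv_equiv track=rewrite | github.com/miliar/Code_Jam_Webscraper | solutions_python/solutions_year16_round0_nr2/3255.py | count
-- ===== SOURCE A (Python) =====
-- def count(pancakes):
--     num = 0
--     last_seen = '+'
--     for pancake in pancakes[::-1]:
--         if pancake != last_seen:
--             num += 1
--         last_seen = pancake
--     return num
-- ===== SOURCE B (Python) =====
-- import itertools
--
-- def count(pancakes):
--     return sum(1 for _ in itertools.groupby(pancakes + '+')) - 1
-- ===== Notes on version B (the rewrite author's own statement) =====
-- stated objective: simpler
-- what changed: B counts the maximal runs of equal characters in the string with a plus sentinel appended using itertools.groupby and subtracts one, instead of reversing the string and tracking a last_seen flag in an explicit loop.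
import Mathlib
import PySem

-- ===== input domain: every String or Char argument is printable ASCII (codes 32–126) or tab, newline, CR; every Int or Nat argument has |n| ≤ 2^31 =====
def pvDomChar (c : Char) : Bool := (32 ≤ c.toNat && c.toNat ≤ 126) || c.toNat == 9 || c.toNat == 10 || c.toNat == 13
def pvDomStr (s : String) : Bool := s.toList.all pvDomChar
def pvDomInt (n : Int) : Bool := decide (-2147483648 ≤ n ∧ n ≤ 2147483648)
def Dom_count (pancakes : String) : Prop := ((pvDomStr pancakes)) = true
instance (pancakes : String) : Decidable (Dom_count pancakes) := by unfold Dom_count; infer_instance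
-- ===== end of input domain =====

-- B counts maximal runs of equal characters in pancakes+'+' and subtracts one, instead of
-- reversing the string and tracking a last_seen flag (objective: simpler decomposition).

-- ===== PORT A =====
-- pancakes[::-1] over a string is exactly the reversed character list (full-slice, step -1).
def count (pancakes : String) : Int :=
  (pancakes.toList.reverse.foldl
    (fun (st : Int × Char) pancake =>
      (if pancake ≠ st.2 then st.1 + 1 else st.1, pancake))
    (0, '+')).1

-- ===== PORT B =====
-- itertools.groupby: one group per maximal run of equal elements; countGroups counts them.
def countGroups : List Char → Int
  | [] => 0
  | a :: rest => 1 + countGroups (rest.dropWhile (· == a))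
termination_by l => l.length
decreasing_by simpa using Nat.lt_succ_of_le (List.length_dropWhile_le _ _)

def count_alt (pancakes : String) : Int :=
  countGroups (pancakes.toList ++ ['+']) - 1

-- ===== PRECONDITION & SPEC =====
def Spec_count (pancakes : String) (out : Int) : Prop := out = count_alt pancakes
instance (pancakes : String) (out : Int) : Decidable (Spec_count pancakes out) := by unfold Spec_count; infer_instance

-- ===== CLAIM (what is proved, stated in full; the proofs are below) =====
def Claim_equal_count : Prop := ∀ (pancakes : String), Dom_count pancakes → Spec_count pancakes (count pancakes)

-- ===== LEMMAS AND PROOFS =====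

-- number of adjacent unequal pairs
def diffs : List Char → Int
  | [] => 0
  | [_] => 0
  | a :: b :: t => (if a ≠ b then 1 else 0) + diffs (b :: t)

theorem foldl_diffs (l : List Char) : ∀ (n : Int) (last : Char),
    (l.foldl (fun (st : Int × Char) c => (if c ≠ st.2 then st.1 + 1 else st.1, c)) (n, last)).1
      = n + diffs (last :: l) := by
  induction l with
  | nil => intro n last; simp [diffs]
  | cons a t ih =>
    intro n last
    simp only [List.foldl_cons, ih, diffs]
    split_ifs with h h' h' <;> (simp_all [ne_comm]; try omega)

theorem diffs_cons (a : Char) (l : List Char) :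
    diffs (a :: l) = diffs l + (match l.head? with
      | none => 0 | some c => if a ≠ c then 1 else 0) := by
  cases l with
  | nil => simp [diffs]
  | cons b t => simp [diffs]; omega

theorem diffs_append_singleton (l : List Char) (a : Char) :
    diffs (l ++ [a]) = diffs l + (match l.getLast? with
      | none => 0 | some c => if c ≠ a then 1 else 0) := by
  induction l with
  | nil => simp [diffs]
  | cons b t ih =>
    cases t with
    | nil => simp [diffs]
    | cons c u =>
      simp only [List.cons_append, diffs] at *
      rw [ih]
      simp [List.getLast?_cons_cons]
      omega

theorem diffs_reverse (l : List Char) : diffs l.reverse = diffs l := by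
  induction l with
  | nil => rfl
  | cons a t ih =>
    rw [List.reverse_cons, diffs_append_singleton, ih, List.getLast?_reverse,
      diffs_cons a t]
    cases h : t.head? <;> simp [ne_comm]

theorem countGroups_cons (a : Char) (l : List Char) :
    countGroups (a :: l) = 1 + diffs (a :: l) := by
  induction l generalizing a with
  | nil => simp [countGroups, diffs]
  | cons b t ih =>
    rw [countGroups]
    by_cases h : b = a
    · subst h
      have : (b :: t).dropWhile (· == b) = t.dropWhile (· == b) := by
        simp [List.dropWhile]
      rw [this]
      have := ih b
      rw [countGroups] at this
      rw [this]
      simp [diffs]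
    · have hba : (b == a) = false := by simp [h]
      have : (b :: t).dropWhile (· == a) = b :: t := by
        rw [List.dropWhile, hba]
      rw [this, ih b]
      simp [diffs, Ne.symm h]

theorem countGroups_eq (l : List Char) :
    countGroups l = diffs l + (if l = [] then 0 else 1) := by
  cases l with
  | nil => simp [countGroups, diffs]
  | cons a t => rw [countGroups_cons]; simp; omega

-- ===== VERDICT (by name: the statement is the Claim_ definition above) =====
theorem count_spec : Claim_equal_count := by
  intro s _
  unfold Spec_count count count_alt
  rw [foldl_diffs, countGroups_eq]
  have h1 : ('+' :: s.toList.reverse) = (s.toList ++ ['+']).reverse := by simp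
  rw [h1, diffs_reverse]
  simp
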